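-- pv_equiv track=rewrite | github.com/sonvt8/AIO2025 | week4/streamlit/point_analization.py | percentage_distribution
-- ===== SOURCE A (Python) =====
-- def percentage_distribution(scores):
--     bins = {"90-100": 0, "80-89": 0, "70-79": 0, "60-69": 0, "<60": 0}
--     for score in scores:
--       if score >= 90:
--         bins["90-100"] += 1
--       elif score >= 80:
--         bins["80-89"] += 1
--       elif score >= 70:
--         bins["70-79"] += 1
--       elif score >= 60:
--         bins["60-69"] += 1
--       else:
--         bins["<60"] += 1
--     bins = {k: v for k, v in bins.items() if v != 0}
--     return bins
-- ===== SOURCE B (Python) =====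
-- def percentage_distribution(scores):
--     # staged: cumulative ">= threshold" counts, then bin counts by subtraction
--     ge = {t: sum(1 for s in scores if s >= t) for t in (90, 80, 70, 60)}
--     counts = {
--         "90-100": ge[90],
--         "80-89": ge[80] - ge[90],
--         "70-79": ge[70] - ge[80],
--         "60-69": ge[60] - ge[70],
--         "<60": len(scores) - ge[60],
--     }
--     return {k: v for k, v in counts.items() if v != 0}
-- ===== Notes on version B (the rewrite author's own statement) =====
-- stated objective: alternative
-- what changed: Instead of A's single pass that buckets each score with an if/elif chain into a dict, B makes staged passes computing cumulative counts of scores >= each threshold and derives every bin count by subtracting adjacent cumulative counts, then filters zeros.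
import Mathlib
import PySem

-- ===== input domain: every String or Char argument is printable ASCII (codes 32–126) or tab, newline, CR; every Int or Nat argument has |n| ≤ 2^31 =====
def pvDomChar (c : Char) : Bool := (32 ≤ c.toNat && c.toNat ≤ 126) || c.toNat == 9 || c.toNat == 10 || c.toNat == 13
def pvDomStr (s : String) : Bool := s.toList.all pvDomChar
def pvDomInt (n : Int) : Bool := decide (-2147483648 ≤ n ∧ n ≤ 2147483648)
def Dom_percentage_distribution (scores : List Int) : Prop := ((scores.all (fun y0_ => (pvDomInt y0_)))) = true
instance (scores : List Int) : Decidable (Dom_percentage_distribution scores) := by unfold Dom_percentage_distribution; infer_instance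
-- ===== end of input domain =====

-- B replaces A's single bucketing pass by staged cumulative ">= threshold" counts combined by subtraction (alternative decomposition, same cost).

-- ===== PORT A =====
-- bins[k] += 1 on an always-present key = Dict.modify k 0 (· + 1)
def pvStepA (d : PySem.Dict String Int) (score : Int) : PySem.Dict String Int :=
  if score ≥ 90 then d.modify "90-100" 0 (· + 1)
  else if score ≥ 80 then d.modify "80-89" 0 (· + 1)
  else if score ≥ 70 then d.modify "70-79" 0 (· + 1)
  else if score ≥ 60 then d.modify "60-69" 0 (· + 1)
  else d.modify "<60" 0 (· + 1)

def percentage_distribution (scores : List Int) : List (String × Int) :=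
  let bins : PySem.Dict String Int :=
    PySem.Dict.ofList [("90-100", 0), ("80-89", 0), ("70-79", 0), ("60-69", 0), ("<60", 0)]
  let bins := scores.foldl pvStepA bins
  bins.items.filter (fun p => p.2 != 0)

-- ===== PORT B =====
-- sum(1 for s in scores if s >= t)
def pvCountGe (scores : List Int) (t : Int) : Int :=
  ((scores.filter (fun s => t ≤ s)).map (fun _ => (1 : Int))).sum

def percentage_distribution_alt (scores : List Int) : List (String × Int) :=
  let g90 := pvCountGe scores 90
  let g80 := pvCountGe scores 80
  let g70 := pvCountGe scores 70
  let g60 := pvCountGe scores 60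
  let counts : List (String × Int) :=
    [("90-100", g90), ("80-89", g80 - g90), ("70-79", g70 - g80),
     ("60-69", g60 - g70), ("<60", (scores.length : Int) - g60)]
  counts.filter (fun p => p.2 != 0)

-- ===== PRECONDITION & SPEC =====
def Spec_percentage_distribution (scores : List Int) (out : List (String × Int)) : Prop := out = percentage_distribution_alt scores
instance (scores : List Int) (out : List (String × Int)) : Decidable (Spec_percentage_distribution scores out) := by unfold Spec_percentage_distribution; infer_instance

-- ===== CLAIM (what is proved, stated in full; the proofs are below) =====
def Claim_equal_percentage_distribution : Prop := ∀ (scores : List Int), Dom_percentage_distribution scores → Spec_percentage_distribution scores (percentage_distribution scores)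

-- ===== LEMMAS AND PROOFS =====
def pvD (a b c d e : Int) : PySem.Dict String Int :=
  PySem.Dict.mk [("90-100", a), ("80-89", b), ("70-79", c), ("60-69", d), ("<60", e)]

theorem pvCountGe_cons (x : Int) (xs : List Int) (t : Int) :
    pvCountGe (x :: xs) t = (if t ≤ x then 1 else 0) + pvCountGe xs t := by
  unfold pvCountGe
  simp [List.filter_cons]
  split <;> simp <;> omega

theorem pvStepA_pvD (a b c d e s : Int) :
    pvStepA (pvD a b c d e) s =
      pvD (if s ≥ 90 then a + 1 else a)
          (if s ≥ 80 ∧ ¬ s ≥ 90 then b + 1 else b)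
          (if s ≥ 70 ∧ ¬ s ≥ 80 then c + 1 else c)
          (if s ≥ 60 ∧ ¬ s ≥ 70 then d + 1 else d)
          (if ¬ s ≥ 60 then e + 1 else e) := by
  unfold pvStepA pvD
  by_cases h90 : s ≥ 90 <;> by_cases h80 : s ≥ 80 <;> by_cases h70 : s ≥ 70 <;>
    by_cases h60 : s ≥ 60 <;>
    simp [h90, h80, h70, h60, PySem.Dict.modify, PySem.Dict.insert, PySem.Dict.getD,
      PySem.Dict.get?, PySem.Dict.contains] <;> omega

theorem pvFoldA (xs : List Int) : ∀ (a b c d e : Int),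
    xs.foldl pvStepA (pvD a b c d e) =
      pvD (a + pvCountGe xs 90)
          (b + (pvCountGe xs 80 - pvCountGe xs 90))
          (c + (pvCountGe xs 70 - pvCountGe xs 80))
          (d + (pvCountGe xs 60 - pvCountGe xs 70))
          (e + ((xs.length : Int) - pvCountGe xs 60)) := by
  induction xs with
  | nil => intro a b c d e; simp [pvCountGe]
  | cons x xs ih =>
    intro a b c d e
    rw [List.foldl_cons, pvStepA_pvD, ih]
    simp only [pvCountGe_cons, List.length_cons]
    congr 1 <;> try (split_ifs <;> push_cast <;> omega)

-- ===== VERDICT (by name: the statement is the Claim_ definition above) =====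
theorem percentage_distribution_spec : Claim_equal_percentage_distribution := by
  intro scores _
  show percentage_distribution scores = percentage_distribution_alt scores
  unfold percentage_distribution percentage_distribution_alt
  have : PySem.Dict.ofList [("90-100", (0:Int)), ("80-89", 0), ("70-79", 0), ("60-69", 0), ("<60", 0)] = pvD 0 0 0 0 0 := by decide
  rw [this]
  simp only [pvFoldA]
  simp [pvD]
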